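-- pv_equiv track=rewrite | github.com/hieronymous-bean/advent-of-python | src/2015/2015.1.py | mainFunction
-- ===== SOURCE A (Python) =====
-- def mainFunction(fileInput):
--   floor = 0
--   basementIndex = 0
--
--   for character in enumerate(fileInput, start = 1):
--     if character[1] == '(':
--       floor = floor + 1
--     elif character[1] == ')':
--       floor = floor - 1
--
--       if floor == -1 and basementIndex == 0:
--         basementIndex = character[0]
--
--   return (floor, basementIndex)
-- ===== SOURCE B (Python) =====
-- def mainFunction(fileInput):
--   # final floor in closed form from two character counts
--   floor = fileInput.count('(') - fileInput.count(')')
--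
--   # separate search for the first 1-based position where the balance hits -1
--   basementIndex = 0
--   balance = 0
--   for index, character in enumerate(fileInput, start=1):
--     if character == '(':
--       balance = balance + 1
--     elif character == ')':
--       balance = balance - 1
--       if balance == -1:
--         basementIndex = index
--         break
--
--   return (floor, basementIndex)
-- ===== Notes on version B (the rewrite author's own statement) =====
-- stated objective: simpler
-- what changed: Replaces the single combined accumulator loop by a closed-form floor (count('(') - count(')')) plus a dedicated early-exit search for the first index where the running balance reaches -1.
import Mathlib
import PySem

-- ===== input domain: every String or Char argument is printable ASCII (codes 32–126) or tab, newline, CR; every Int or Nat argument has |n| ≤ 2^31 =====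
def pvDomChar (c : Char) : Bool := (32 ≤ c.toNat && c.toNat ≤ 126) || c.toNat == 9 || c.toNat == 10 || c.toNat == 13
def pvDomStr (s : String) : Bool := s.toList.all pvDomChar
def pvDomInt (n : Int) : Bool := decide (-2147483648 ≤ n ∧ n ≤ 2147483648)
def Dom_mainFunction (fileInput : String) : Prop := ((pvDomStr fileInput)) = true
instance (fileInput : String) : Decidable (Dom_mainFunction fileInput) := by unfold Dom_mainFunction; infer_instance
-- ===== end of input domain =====

-- B splits A's single combined loop into a closed-form floor (two character counts)
-- plus a dedicated early-exit search for the basement index; objective: simpler.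

-- ===== PORT A =====
-- one pass over enumerate(fileInput, start=1) carrying (floor, basementIndex)
def mainFunction (fileInput : String) : Int × Int :=
  (PySem.List.enumerate fileInput.toList 1).foldl
    (fun (st : Int × Int) character =>
      if character.2 == '(' then (st.1 + 1, st.2)
      else if character.2 == ')' then
        let floor := st.1 - 1
        if floor == -1 && st.2 == 0 then (floor, character.1) else (floor, st.2)
      else st)
    (0, 0)

-- ===== PORT B =====
-- B's basement search: walk the enumerated characters keeping only the running balance,
-- return the first 1-based index where it reaches -1 (0 if never)
def findBasement : List (Int × Char) → Int → Int
  | [], _ => 0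
  | (i, c) :: rest, balance =>
    if c == '(' then findBasement rest (balance + 1)
    else if c == ')' then
      if balance - 1 == -1 then i else findBasement rest (balance - 1)
    else findBasement rest balance

-- Source B's fileInput.count(c) for the single-character needles is the count of that
-- code point, ported as List.count on the code points (exact for 1-char substrings)
def mainFunction_alt (fileInput : String) : Int × Int :=
  ((fileInput.toList.count '(' : Int) - (fileInput.toList.count ')' : Int),
   findBasement (PySem.List.enumerate fileInput.toList 1) 0)

-- ===== PRECONDITION & SPEC =====
def Spec_mainFunction (fileInput : String) (out : Int × Int) : Prop := out = mainFunction_alt fileInput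
instance (fileInput : String) (out : Int × Int) : Decidable (Spec_mainFunction fileInput out) := by unfold Spec_mainFunction; infer_instance

-- ===== CLAIM (what is proved, stated in full; the proofs are below) =====
def Claim_equal_mainFunction : Prop := ∀ (fileInput : String), Dom_mainFunction fileInput → Spec_mainFunction fileInput (mainFunction fileInput)

-- ===== LEMMAS AND PROOFS =====

-- abbreviation for A's loop body
def stepA (st : Int × Int) (character : Int × Char) : Int × Int :=
  if character.2 == '(' then (st.1 + 1, st.2)
  else if character.2 == ')' then
    let floor := st.1 - 1
    if floor == -1 && st.2 == 0 then (floor, character.1) else (floor, st.2)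
  else st

theorem mainFunction_eq_foldl (s : String) :
    mainFunction s = (PySem.List.enumerate s.toList 1).foldl stepA (0, 0) := rfl

-- once basementIndex is nonzero it never changes
theorem foldl_stepA_snd_sticky : ∀ (l : List (Int × Char)) (f b : Int), b ≠ 0 →
    (l.foldl stepA (f, b)).2 = b
  | [], _, _, _ => rfl
  | (i, c) :: rest, f, b, hb => by
    simp only [List.foldl_cons, stepA]
    by_cases h1 : c = '('
    · simpa [h1] using foldl_stepA_snd_sticky rest (f + 1) b hb
    · by_cases h2 : c = ')'
      · have : ¬ (f - 1 == -1 && b == 0) = true := by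
          simp [hb]
        simp only [h2, if_pos, beq_iff_eq, this]
        simpa using foldl_stepA_snd_sticky rest (f - 1) b hb
      · simpa [h1, h2] using foldl_stepA_snd_sticky rest f b hb

-- the floor component is the starting floor plus the count difference, whatever b is
theorem foldl_stepA_fst : ∀ (cs : List Char) (s f b : Int),
    ((PySem.List.enumerate cs s).foldl stepA (f, b)).1
      = f + (cs.count '(' : Int) - (cs.count ')' : Int)
  | [], s, f, b => by simp [PySem.List.enumerate_nil]
  | c :: rest, s, f, b => by
    rw [PySem.List.enumerate_cons]
    simp only [List.foldl_cons, stepA, List.count_cons]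
    by_cases h1 : c = '('
    · rw [if_pos (by simp [h1])]
      rw [foldl_stepA_fst rest (s + 1) (f + 1)]
      simp [h1]
      ring
    · by_cases h2 : c = ')'
      · rw [if_neg (by simp [h1]), if_pos (by simp [h2])]
        by_cases h3 : (f - 1 == -1 && b == 0) = true
        · rw [if_pos h3, foldl_stepA_fst rest (s + 1) (f - 1)]
          simp [h2]
          ring
        · rw [if_neg h3, foldl_stepA_fst rest (s + 1) (f - 1)]
          simp [h2]
          ring
      · rw [if_neg (by simp [h1]), if_neg (by simp [h2])]
        rw [foldl_stepA_fst rest (s + 1) f]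
        simp [h1, h2]

-- while basementIndex is still 0, A's second component computes B's findBasement
-- (indices produced by enumerate from s ≥ 1 are nonzero, so a set index sticks)
theorem foldl_stepA_snd : ∀ (cs : List Char) (s f : Int), 1 ≤ s →
    ((PySem.List.enumerate cs s).foldl stepA (f, 0)).2
      = findBasement (PySem.List.enumerate cs s) f
  | [], s, f, _ => by simp [PySem.List.enumerate_nil, findBasement]
  | c :: rest, s, f, hs => by
    rw [PySem.List.enumerate_cons]
    simp only [List.foldl_cons, stepA, findBasement]
    by_cases h1 : c = '('
    · simp only [h1, beq_self_eq_true, if_true]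
      exact foldl_stepA_snd rest (s + 1) (f + 1) (by omega)
    · by_cases h2 : c = ')'
      · have hb1 : (c == '(') = false := by simp [h1]
        have hb2 : (c == ')') = true := by simp [h2]
        simp only [hb1, hb2, Bool.false_eq_true, if_false, if_true]
        by_cases h3 : f - 1 = -1
        · simp only [h3, beq_self_eq_true, Bool.and_self, if_true]
          exact foldl_stepA_snd_sticky _ _ s (by omega)
        · have hb3 : (f - 1 == -1) = false := by simp [h3]
          simp only [hb3, Bool.false_and, Bool.false_eq_true, if_false]
          exact foldl_stepA_snd rest (s + 1) (f - 1) (by omega)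
      · have hb1 : (c == '(') = false := by simp [h1]
        have hb2 : (c == ')') = false := by simp [h2]
        simp only [hb1, hb2, Bool.false_eq_true, if_false]
        exact foldl_stepA_snd rest (s + 1) f (by omega)

-- ===== VERDICT (by name: the statement is the Claim_ definition above) =====
theorem mainFunction_spec : Claim_equal_mainFunction := by
  intro s _
  unfold Spec_mainFunction mainFunction_alt
  rw [mainFunction_eq_foldl]
  have h1 := foldl_stepA_fst s.toList 1 0 0
  have h2 := foldl_stepA_snd s.toList 1 0 (le_refl 1)
  refine Prod.ext ?_ ?_
  · rw [h1]; ring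
  · exact h2
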